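-- pv_equiv track=rewrite | github.com/mercurialsolo/mantis | src/mantis_agent/presentation.py | _wrap_for_srt
-- ===== SOURCE A (Python) =====
-- def _wrap_for_srt(text: str, max_chars: int = 44) -> str:
--     """Wrap into max-2 lines, breaking at word boundaries."""
--     words = text.split()
--     if not words:
--         return ""
--     lines: list[str] = []
--     current = words[0]
--     for w in words[1:]:
--         if len(current) + 1 + len(w) <= max_chars:
--             current += " " + w
--         else:
--             lines.append(current)
--             current = w
--             if len(lines) == 2:
--                 # Truncate any further words with an ellipsis.
--                 lines[-1] = lines[-1] + "…"
--                 return "\n".join(lines)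
--     lines.append(current)
--     return "\n".join(lines[:2])
-- ===== SOURCE B (Python) =====
-- def _fit_count(words: list[str], max_chars: int) -> int:
--     """For a non-empty word list: how many leading words fit on one line
--     (first word always taken, then while the joined length stays <= max_chars)."""
--     k, cost = 1, len(words[0])
--     while k < len(words) and cost + 1 + len(words[k]) <= max_chars:
--         cost += 1 + len(words[k])
--         k += 1
--     return k
--
--
-- def _wrap_for_srt(text: str, max_chars: int = 44) -> str:
--     """Wrap into max-2 lines, breaking at word boundaries."""
--     words = text.split()
--     if not words:
--         return ""
--     # Compute break indices over the word list, then assemble by slicing+joining.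
--     k1 = _fit_count(words, max_chars)
--     if k1 == len(words):
--         return " ".join(words)
--     rest = words[k1:]
--     k2 = _fit_count(rest, max_chars)
--     tail = "…" if k2 < len(rest) else ""
--     return " ".join(words[:k1]) + "\n" + " ".join(rest[:k2]) + tail
-- ===== Notes on version B (the rewrite author's own statement) =====
-- stated objective: alternative
-- what changed: B replaces A's stateful accumulation loop (mutable current line, growing lines list, in-loop early return) by breakpoint computation: a _fit_count helper counts how many leading words fit on one line, applied twice to find the two break indices, and the result is assembled by slicing the word list and joining, with the ellipsis decided by an index comparison.
import Mathlib
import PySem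

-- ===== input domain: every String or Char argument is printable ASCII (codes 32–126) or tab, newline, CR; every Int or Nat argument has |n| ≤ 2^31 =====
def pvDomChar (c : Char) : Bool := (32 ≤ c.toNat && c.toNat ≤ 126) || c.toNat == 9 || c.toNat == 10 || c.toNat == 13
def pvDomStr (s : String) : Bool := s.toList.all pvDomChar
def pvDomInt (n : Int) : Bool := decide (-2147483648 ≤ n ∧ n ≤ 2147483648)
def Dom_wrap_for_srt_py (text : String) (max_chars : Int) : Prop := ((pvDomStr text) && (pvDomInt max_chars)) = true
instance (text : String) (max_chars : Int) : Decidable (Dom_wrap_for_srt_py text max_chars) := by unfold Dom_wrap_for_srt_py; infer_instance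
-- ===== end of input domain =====

-- B computes break indices over the word list with a fit-count helper, then assembles by
-- slicing and joining, replacing A's stateful accumulation loop with early return (objective: simpler).


-- ===== PORT A =====
-- A's loop over words[1:] with state (lines, current) and an early return when a third line starts.
def wrapALoop (maxc : Int) (lines : List (List Char)) (current : List Char) :
    List (List Char) → List Char
  | [] => PySem.Chars.join ['\n'] ((lines ++ [current]).take 2)
  | w :: rest =>
    if PySem.Chars.len current + 1 + PySem.Chars.len w ≤ maxc then
      wrapALoop maxc lines (current ++ ' ' :: w) rest
    else
      -- lines.append(current); current = w; if len(lines) == 2: add "…" and return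
      if (lines ++ [current]).length == 2 then
        PySem.Chars.join ['\n']
          ((lines ++ [current]).dropLast ++ [PySem.List.pyGetD (lines ++ [current]) (-1) [] ++ ['…']])
      else
        wrapALoop maxc (lines ++ [current]) w rest

def wrap_for_srt_py (text : String) (max_chars : Int) : String :=
  match PySem.Chars.split₀ text.toList with
  | [] => ""
  | w0 :: rest => String.ofList (wrapALoop max_chars [] w0 rest)

-- ===== PORT B =====
-- B's _fit_count: k starts at 1 (first word always taken), cost tracks the joined length;
-- ported as a recursion over the words after the first, with cost as an accumulator.
def fitCountAux (maxc cost : Int) : List (List Char) → Nat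
  | [] => 0
  | w :: rest =>
    if cost + 1 + PySem.Chars.len w ≤ maxc then
      1 + fitCountAux maxc (cost + 1 + PySem.Chars.len w) rest
    else 0

def fitCount (maxc : Int) : List (List Char) → Nat
  | [] => 0
  | w :: rest => 1 + fitCountAux maxc (PySem.Chars.len w) rest

-- words[:k] / words[k:] with 0 ≤ k are exactly List.take / List.drop.
def wrap_for_srt_py_alt (text : String) (max_chars : Int) : String :=
  match PySem.Chars.split₀ text.toList with
  | [] => ""
  | w0 :: rest0 =>
    let ws := w0 :: rest0
    let k1 := fitCount max_chars ws
    if k1 = ws.length then String.ofList (PySem.Chars.join [' '] ws)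
    else
      let restL := ws.drop k1
      let k2 := fitCount max_chars restL
      let tail : List Char := if k2 < restL.length then ['…'] else []
      String.ofList (PySem.Chars.join [' '] (ws.take k1) ++
        '\n' :: (PySem.Chars.join [' '] (restL.take k2) ++ tail))

-- ===== PRECONDITION & SPEC =====
def Spec_wrap_for_srt_py (text : String) (max_chars : Int) (out : String) : Prop := out = wrap_for_srt_py_alt text max_chars
instance (text : String) (max_chars : Int) (out : String) : Decidable (Spec_wrap_for_srt_py text max_chars out) := by unfold Spec_wrap_for_srt_py; infer_instance

-- ===== CLAIM (what is proved, stated in full; the proofs are below) =====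
def Claim_equal_wrap_for_srt_py : Prop := ∀ (text : String) (max_chars : Int), Dom_wrap_for_srt_py text max_chars → Spec_wrap_for_srt_py text max_chars (wrap_for_srt_py text max_chars)

-- ===== LEMMAS AND PROOFS =====

-- A's accumulated current line: current joined with further words by single spaces.
def joinSp (current : List Char) : List (List Char) → List Char
  | [] => current
  | w :: rest => joinSp (current ++ ' ' :: w) rest

theorem joinSp_eq_join (l : List (List Char)) : ∀ (c : List Char),
    joinSp c l = PySem.Chars.join [' '] (c :: l) := by
  induction l with
  | nil => intro c; rw [joinSp, PySem.Chars.join_singleton]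
  | cons w rest ih =>
    intro c
    rw [joinSp, ih]
    cases rest with
    | nil =>
      simp [PySem.Chars.join_singleton, PySem.Chars.join_cons_cons]
    | cons b l =>
      simp [PySem.Chars.join_cons_cons, List.append_assoc]

theorem fitCountAux_le (maxc : Int) (l : List (List Char)) : ∀ (c : Int),
    fitCountAux maxc c l ≤ l.length := by
  induction l with
  | nil => intro c; simp [fitCountAux]
  | cons w rest ih =>
    intro c
    rw [fitCountAux]
    split
    · have := ih (c + 1 + PySem.Chars.len w); simp only [List.length_cons]; omega
    · simp only [List.length_cons]; omega

-- Unfolding of fitCountAux with the length-cast normal form used in the proofs.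
theorem fitCountAux_cons_pos (maxc c : Int) (w : List Char) (rest : List (List Char))
    (h : c + 1 + (w.length : Int) ≤ maxc) :
    fitCountAux maxc c (w :: rest) = 1 + fitCountAux maxc (c + 1 + (w.length : Int)) rest := by
  rw [fitCountAux]; simp only [PySem.Chars.len_eq]; rw [if_pos h]

theorem fitCountAux_cons_neg (maxc c : Int) (w : List Char) (rest : List (List Char))
    (h : ¬ c + 1 + (w.length : Int) ≤ maxc) :
    fitCountAux maxc c (w :: rest) = 0 := by
  rw [fitCountAux]; simp only [PySem.Chars.len_eq]; rw [if_neg h]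

theorem len_append_word (current w : List Char) :
    ((current ++ ' ' :: w).length : Int) = (current.length : Int) + 1 + (w.length : Int) := by
  simp; omega

-- Phase 2 of A's loop (one completed line): it packs exactly fitCountAux-many further
-- words into the current line, then either ends or truncates with an ellipsis.
theorem phase2 (maxc : Int) (line1 : List Char) (ws : List (List Char)) :
    ∀ (current : List Char),
      wrapALoop maxc [line1] current ws =
        if fitCountAux maxc (current.length : Int) ws = ws.length then
          PySem.Chars.join ['\n'] [line1, joinSp current ws]
        else
          PySem.Chars.join ['\n']
            [line1, joinSp current (ws.take (fitCountAux maxc (current.length : Int) ws)) ++ ['…']] := by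
  induction ws with
  | nil =>
    intro current
    rw [wrapALoop,
      if_pos (show fitCountAux maxc ((current.length : Int)) [] = ([] : List (List Char)).length from rfl)]
    rfl
  | cons w rest ih =>
    intro current
    by_cases hfit : (current.length : Int) + 1 + (w.length : Int) ≤ maxc
    · rw [wrapALoop,
        if_pos (show PySem.Chars.len current + 1 + PySem.Chars.len w ≤ maxc by
          simpa [PySem.Chars.len_eq] using hfit),
        ih (current ++ ' ' :: w), len_append_word, fitCountAux_cons_pos maxc _ w rest hfit]
      by_cases hk : fitCountAux maxc ((current.length : Int) + 1 + (w.length : Int)) rest = rest.length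
      · rw [if_pos hk, if_pos (by simp only [List.length_cons, hk]; omega)]
        rfl
      · rw [if_neg hk, if_neg (by simp only [List.length_cons]; omega),
          Nat.add_comm 1 _, List.take_succ_cons]
        rfl
    · rw [wrapALoop,
        if_neg (show ¬ PySem.Chars.len current + 1 + PySem.Chars.len w ≤ maxc by
          simpa [PySem.Chars.len_eq] using hfit),
        if_pos (by rfl), fitCountAux_cons_neg maxc _ w rest hfit, if_neg (by simp)]
      rw [show ([line1] ++ [current] : List (List Char)) = [line1] ++ [current] from rfl,
        PySem.List.pyGetD_neg_one_append_singleton, List.dropLast_concat]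
      rfl

-- Phase 1 of A's loop (no completed line yet): it packs fitCountAux-many further words
-- into the first line, then either ends with a single line or enters phase 2.
theorem phase1 (maxc : Int) (ws : List (List Char)) :
    ∀ (current : List Char),
      wrapALoop maxc [] current ws =
        if fitCountAux maxc (current.length : Int) ws = ws.length then
          PySem.Chars.join ['\n'] [joinSp current ws]
        else
          wrapALoop maxc [joinSp current (ws.take (fitCountAux maxc (current.length : Int) ws))]
            ((ws.drop (fitCountAux maxc (current.length : Int) ws)).headI)
            ((ws.drop (fitCountAux maxc (current.length : Int) ws)).tail) := by
  induction ws with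
  | nil =>
    intro current
    rw [wrapALoop,
      if_pos (show fitCountAux maxc ((current.length : Int)) [] = ([] : List (List Char)).length from rfl)]
    rfl
  | cons w rest ih =>
    intro current
    by_cases hfit : (current.length : Int) + 1 + (w.length : Int) ≤ maxc
    · rw [wrapALoop,
        if_pos (show PySem.Chars.len current + 1 + PySem.Chars.len w ≤ maxc by
          simpa [PySem.Chars.len_eq] using hfit),
        ih (current ++ ' ' :: w), len_append_word, fitCountAux_cons_pos maxc _ w rest hfit]
      by_cases hk : fitCountAux maxc ((current.length : Int) + 1 + (w.length : Int)) rest = rest.length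
      · rw [if_pos hk, if_pos (by simp only [List.length_cons, hk]; omega)]
        rfl
      · rw [if_neg hk, if_neg (by simp only [List.length_cons]; omega),
          Nat.add_comm 1 _, List.take_succ_cons, List.drop_succ_cons]
        rfl
    · rw [wrapALoop,
        if_neg (show ¬ PySem.Chars.len current + 1 + PySem.Chars.len w ≤ maxc by
          simpa [PySem.Chars.len_eq] using hfit),
        if_neg (by simp), fitCountAux_cons_neg maxc _ w rest hfit, if_neg (by simp)]
      rfl

-- ===== VERDICT (by name: the statement is the Claim_ definition above) =====
theorem wrap_for_srt_py_spec : Claim_equal_wrap_for_srt_py := by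
  intro text maxc _
  unfold Spec_wrap_for_srt_py wrap_for_srt_py wrap_for_srt_py_alt
  cases hws : PySem.Chars.split₀ text.toList with
  | nil => rfl
  | cons w0 rest =>
    show String.ofList (wrapALoop maxc [] w0 rest) = _
    rw [phase1]
    simp only [fitCount, PySem.Chars.len_eq]
    by_cases hk : fitCountAux maxc ((w0.length : Int)) rest = rest.length
    · rw [if_pos hk, if_pos (by simp only [List.length_cons, hk]; omega)]
      rw [joinSp_eq_join, PySem.Chars.join_singleton]
    · have hle := fitCountAux_le maxc rest ((w0.length : Int))
      -- (hle already in length form)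
      rw [if_neg hk, if_neg (by simp only [List.length_cons]; omega)]
      obtain ⟨h, t, hdrop⟩ : ∃ h t, rest.drop (fitCountAux maxc ((w0.length : Int)) rest) = h :: t := by
        rcases e : rest.drop (fitCountAux maxc ((w0.length : Int)) rest) with _ | ⟨h, t⟩
        · exfalso
          have := List.length_drop (l := rest) (i := fitCountAux maxc ((w0.length : Int)) rest)
          rw [e] at this; simp at this; omega
        · exact ⟨h, t, rfl⟩
      have htake : (w0 :: rest).take (1 + fitCountAux maxc ((w0.length : Int)) rest) =
          w0 :: rest.take (fitCountAux maxc ((w0.length : Int)) rest) := by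
        rw [Nat.add_comm, List.take_succ_cons]
      have hdrop' : (w0 :: rest).drop (1 + fitCountAux maxc ((w0.length : Int)) rest) =
          rest.drop (fitCountAux maxc ((w0.length : Int)) rest) := by
        rw [Nat.add_comm, List.drop_succ_cons]
      rw [hdrop, phase2]
      simp only [List.headI, List.tail_cons, htake, hdrop', hdrop]
      have hle2 := fitCountAux_le maxc t ((h.length : Int))
      -- (hle2 already in length form)
      by_cases hk2 : fitCountAux maxc ((h.length : Int)) t = t.length
      · have htk : (h :: t).take (1 + fitCountAux maxc ((h.length : Int)) t) = h :: t :=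
          List.take_of_length_le (by simp only [List.length_cons]; omega)
        rw [if_pos hk2, if_neg (by simp only [List.length_cons]; omega), htk, List.append_nil]
        rw [joinSp_eq_join, joinSp_eq_join, PySem.Chars.join_cons_cons, PySem.Chars.join_singleton]
        simp [List.append_assoc]
      · rw [if_neg hk2, if_pos (by simp only [List.length_cons]; omega),
          Nat.add_comm 1 _, List.take_succ_cons]
        rw [joinSp_eq_join, joinSp_eq_join, PySem.Chars.join_cons_cons, PySem.Chars.join_singleton]
        simp [List.append_assoc]
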